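-- pv_equiv track=rewrite | github.com/kuoowen-web/taiwan-news-ai-search | crawled/NLWeb_Crawler_System_v2.4/src/utils/text_processor.py | smart_extract_summary
-- ===== SOURCE A (Python) =====
-- from typing import List
--
-- def smart_extract_summary(paragraphs: List[str]) -> str:
--     """
--     智慧摘要演算法：首段 + 中間最長的兩段 + 尾段
--     移植自 ltn.py 和 udn.py 的邏輯
--
--     參數:
--         paragraphs: 段落列表
--
--     返回:
--         合併後的摘要，若超過 20,000 字元則截斷
--     """
--     if not paragraphs:
--         return ""
--
--     # 若只有一段，直接返回
--     if len(paragraphs) == 1: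
--         return paragraphs[0]
--
--     # 若只有兩段，直接合併
--     if len(paragraphs) == 2:
--         summary = "\n\n".join(paragraphs)
--         return summary[:20000]  # 確保不超過 20,000 字元
--
--     # 取首段
--     first = paragraphs[0]
--
--     # 取尾段
--     last = paragraphs[-1]
--
--     # 取中間段落（排除首尾段）
--     middle = paragraphs[1:-1]
--
--     # 如果沒有中間段落，只返回首尾段
--     if not middle:
--         summary = f"{first}\n\n{last}"
--         return summary[:20000]
--
--     # 按長度排序中間段落，取最長的兩段
--     sorted_middle = sorted(middle, key=len, reverse=True)
--     selected = sorted_middle[:min(2, len(sorted_middle))]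
--
--     # 找出選中的中段在原文中的位置，並按原順序添加
--     selected_ordered = [p for p in middle if p in selected]
--
--     # 合併成最終摘要：首段 + 選中的中段（保持原順序）+ 尾段
--     summary = "\n\n".join([first] + selected_ordered + [last])
--
--     # 確保不超過 20,000 字元
--     if len(summary) > 20000:
--         summary = summary[:20000]
--
--     return summary
-- ===== SOURCE B (Python) =====
-- from typing import List
--
-- def smart_extract_summary(paragraphs: List[str]) -> str:
--     """Same summary, but the two longest middle paragraphs are found in one
--     linear scan (stable: earlier paragraph wins length ties) instead of sorting."""
--     if not paragraphs:
--         return ""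
--     if len(paragraphs) == 1:
--         return paragraphs[0]
--     if len(paragraphs) == 2:
--         return "\n\n".join(paragraphs)[:20000]
--     first = paragraphs[0]
--     last = paragraphs[-1]
--     middle = paragraphs[1:-1]
--     best1 = None  # longest middle paragraph (first on ties)
--     best2 = None  # second one in the stable descending-length order
--     for p in middle:
--         if best1 is None or len(p) > len(best1):
--             best2 = best1
--             best1 = p
--         elif best2 is None or len(p) > len(best2):
--             best2 = p
--     kept = [p for p in middle if p == best1 or (best2 is not None and p == best2)]
--     return "\n\n".join([first] + kept + [last])[:20000]
-- ===== Notes on version B (the rewrite author's own statement) =====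
-- stated objective: alternative
-- what changed: Replaces sorting all middle paragraphs by length (plus list-membership tests against the selected slice) with one linear scan that tracks the two longest middle paragraphs (same stable tie-breaking) and a direct equality test in the order-preserving filter.
import Mathlib
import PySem

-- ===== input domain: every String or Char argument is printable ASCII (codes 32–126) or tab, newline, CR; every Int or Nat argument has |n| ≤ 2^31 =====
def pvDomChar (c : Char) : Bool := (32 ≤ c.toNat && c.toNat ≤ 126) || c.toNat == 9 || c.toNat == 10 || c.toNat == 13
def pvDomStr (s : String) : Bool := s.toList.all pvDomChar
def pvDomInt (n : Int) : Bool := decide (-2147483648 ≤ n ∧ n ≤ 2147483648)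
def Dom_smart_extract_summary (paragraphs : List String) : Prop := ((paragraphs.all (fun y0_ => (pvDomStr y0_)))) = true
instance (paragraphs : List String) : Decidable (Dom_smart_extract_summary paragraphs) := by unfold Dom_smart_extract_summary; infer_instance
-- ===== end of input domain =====

-- B replaces A's sort of the middle paragraphs by one linear scan for the two longest (same stable tie-breaking); equivalence is exact on every input.

-- ===== PORT A =====
-- literal transliteration of Source A (f"{first}\n\n{last}" is rendered as the same join)
def smart_extract_summary (paragraphs : List String) : String :=
  if paragraphs = [] then ""
  else if paragraphs.length = 1 then PySem.List.pyGetD paragraphs 0 ""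
  else if paragraphs.length = 2 then
    PySem.Str.slice (PySem.Str.join "\n\n" paragraphs) none (some 20000)
  else
    let first := PySem.List.pyGetD paragraphs 0 ""
    let last := PySem.List.pyGetD paragraphs (-1) ""
    let middle := PySem.List.slice paragraphs (some 1) (some (-1))
    if middle = [] then
      PySem.Str.slice (PySem.Str.join "\n\n" [first, last]) none (some 20000)
    else
      let sorted_middle := PySem.List.sorted middle (fun p => PySem.Str.len p) true
      let selected := PySem.List.slice sorted_middle none (some (min 2 (PySem.List.len sorted_middle)))
      let selected_ordered := middle.filter (fun p => selected.contains p)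
      let summary := PySem.Str.join "\n\n" ([first] ++ selected_ordered ++ [last])
      if PySem.Str.len summary > 20000 then PySem.Str.slice summary none (some 20000)
      else summary

-- ===== PORT B =====
-- one step of Source B's linear scan: (best1, best2) updated by paragraph p
def pvScanStep (b : Option String × Option String) (p : String) : Option String × Option String :=
  match b with
  | (none, b2) => (some p, b2)
  | (some v, b2) =>
    if PySem.Str.len p > PySem.Str.len v then (some p, some v)
    else match b2 with
      | none => (some v, some p)
      | some w => if PySem.Str.len p > PySem.Str.len w then (some v, some p) else (some v, some w)

-- does Source B's comprehension keep p?  p == best1 or (best2 is not None and p == best2)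
def pvKeep (b : Option String × Option String) (p : String) : Bool :=
  (b.1 == some p) || (b.2 == some p)

def smart_extract_summary_alt (paragraphs : List String) : String :=
  if paragraphs = [] then ""
  else if paragraphs.length = 1 then PySem.List.pyGetD paragraphs 0 ""
  else if paragraphs.length = 2 then
    PySem.Str.slice (PySem.Str.join "\n\n" paragraphs) none (some 20000)
  else
    let first := PySem.List.pyGetD paragraphs 0 ""
    let last := PySem.List.pyGetD paragraphs (-1) ""
    let middle := PySem.List.slice paragraphs (some 1) (some (-1))
    let best := middle.foldl pvScanStep (none, none)
    let kept := middle.filter (pvKeep best)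
    PySem.Str.slice (PySem.Str.join "\n\n" ([first] ++ kept ++ [last])) none (some 20000)

-- ===== PRECONDITION & SPEC =====
def Spec_smart_extract_summary (paragraphs : List String) (out : String) : Prop := out = smart_extract_summary_alt paragraphs
instance (paragraphs : List String) (out : String) : Decidable (Spec_smart_extract_summary paragraphs out) := by unfold Spec_smart_extract_summary; infer_instance

-- ===== CLAIM (what is proved, stated in full; the proofs are below) =====
def Claim_equal_smart_extract_summary : Prop := ∀ (paragraphs : List String), Dom_smart_extract_summary paragraphs → Spec_smart_extract_summary paragraphs (smart_extract_summary paragraphs)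

-- ===== LEMMAS AND PROOFS =====

-- the first two elements of a list, as the scan's state
def pvFirstTwo (l : List String) : Option String × Option String := (l.head?, l.tail.head?)

-- one scan step = how stable insertion into the descending-length list moves its first two slots
theorem pvScanStep_insertBy (acc : List String) (x : String) :
    pvScanStep (pvFirstTwo acc) x
      = pvFirstTwo (PySem.List.insertBy
          (fun a b => decide (PySem.Str.len b < PySem.Str.len a)) x acc) := by
  match acc with
  | [] => rfl
  | [a] =>
    by_cases h : a.length < x.length <;>
      simp [pvFirstTwo, pvScanStep, PySem.List.insertBy, h, gt_iff_lt]
  | a :: b :: t =>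
    by_cases h1 : a.length < x.length <;>
      by_cases h2 : b.length < x.length <;>
      simp [pvFirstTwo, pvScanStep, PySem.List.insertBy, h1, h2, gt_iff_lt]

-- the scan over the list computes the first two of the stable descending sort
theorem pvScan_eq_firstTwo (rest acc : List String) :
    rest.foldl pvScanStep (pvFirstTwo acc)
      = pvFirstTwo (rest.foldl
          (fun acc x => PySem.List.insertBy
            (fun a b => decide (PySem.Str.len b < PySem.Str.len a)) x acc) acc) := by
  induction rest generalizing acc with
  | nil => rfl
  | cons x rest ih =>
    simp only [List.foldl_cons, pvScanStep_insertBy acc x]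
    exact ih _

theorem pvScan_sorted (middle : List String) :
    middle.foldl pvScanStep (none, none)
      = pvFirstTwo (PySem.List.sorted middle (fun p => PySem.Str.len p) true) := by
  rw [PySem.List.sorted_rev_eq_foldl_insertBy]
  exact pvScan_eq_firstTwo middle []

-- sorted_middle[:min(2, len(sorted_middle))] is take 2
theorem pvSel_take_two (l : List String) :
    PySem.List.slice l none (some (min 2 (PySem.List.len l))) = l.take 2 := by
  rw [PySem.List.slice_to l (show (0:Int) ≤ min 2 (PySem.List.len l) by
    simp only [PySem.List.len_eq]; omega)]
  have h : (min 2 (PySem.List.len l)).toNat = min 2 l.length := by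
    simp only [PySem.List.len_eq]; omega
  rw [h, ← List.take_take, List.take_length]

-- membership in the first two of l is the scan's keep test
theorem pvKeep_take_two (l : List String) (p : String) :
    (l.take 2).contains p = pvKeep (pvFirstTwo l) p := by
  rcases l with _ | ⟨a, _ | ⟨b, t⟩⟩ <;>
    simp [pvFirstTwo, pvKeep, beq_eq_decide, eq_comm]

-- truncation is the identity on short strings
theorem pvSlice_short (s : String) (h : ¬ PySem.Str.len s > 20000) :
    PySem.Str.slice s none (some 20000) = s := by
  apply String.ext
  rw [PySem.Str.toList_slice, PySem.Chars.slice_eq_listSlice,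
    PySem.List.slice_to s.toList (show (0:Int) ≤ 20000 by norm_num)]
  apply List.take_of_length_le
  rw [PySem.Str.len_eq] at h
  omega

-- the middle slice is nonempty once there are at least three paragraphs
theorem pvMiddle_ne_nil (paragraphs : List String) (h : 3 ≤ paragraphs.length) :
    PySem.List.slice paragraphs (some 1) (some (-1)) ≠ [] := by
  intro hnil
  have hl := congrArg List.length hnil
  rw [PySem.List.length_slice, PySem.List.clampIdx_neg_one] at hl
  simp [PySem.List.clampIdx] at hl
  omega

-- ===== VERDICT (by name: the statement is the Claim_ definition above) =====
theorem smart_extract_summary_spec : Claim_equal_smart_extract_summary := by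
  intro paragraphs _
  unfold Spec_smart_extract_summary smart_extract_summary smart_extract_summary_alt
  by_cases h0 : paragraphs = []
  · simp [h0]
  by_cases h1 : paragraphs.length = 1
  · simp [h0, h1]
  by_cases h2 : paragraphs.length = 2
  · simp [h0, h2]
  have h0' : paragraphs.length ≠ 0 := by
    simpa [List.length_eq_zero_iff] using h0
  have h3 : 3 ≤ paragraphs.length := by omega
  have hm := pvMiddle_ne_nil paragraphs h3
  simp only [if_neg h0, if_neg h1, if_neg h2, if_neg hm]
  generalize PySem.List.slice paragraphs (some 1) (some (-1)) = middle
  have hfilter :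
      middle.filter (fun p =>
        (PySem.List.slice (PySem.List.sorted middle (fun p => PySem.Str.len p) true) none
          (some (min 2 (PySem.List.len (PySem.List.sorted middle (fun p => PySem.Str.len p) true))))).contains p)
      = middle.filter (pvKeep (middle.foldl pvScanStep (none, none))) := by
    apply List.filter_congr
    intro p _
    rw [pvSel_take_two, pvKeep_take_two, pvScan_sorted]
  rw [hfilter]
  generalize PySem.Str.join "\n\n"
      ([PySem.List.pyGetD paragraphs 0 ""] ++
        middle.filter (pvKeep (middle.foldl pvScanStep (none, none))) ++
        [PySem.List.pyGetD paragraphs (-1) ""]) = s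
  by_cases hlen : PySem.Str.len s > 20000
  · rw [if_pos hlen]
  · rw [if_neg hlen, pvSlice_short s hlen]
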